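-- pv_equiv track=rewrite | github.com/ipapagi/website-monitor | src/directory_emails.py | group_new_requests_by_directory
-- ===== SOURCE A (Python) =====
-- from typing import Dict, List, Tuple
--
-- def group_new_requests_by_directory(records: List[Dict]) -> Dict[str, List[Dict]]:
--     """Ομαδοποιεί νέες αιτήσεις ανά Διεύθυνση
--
--     Args:
--         records: Λίστα αιτήσεων
--
--     Returns:
--         Dict με κλειδί: directory name, value: λίστα αιτήσεων
--     """
--     grouped = {}
--     for rec in records:
--         directory = rec.get('directory', 'Άγνωστη Διεύθυνση')
--         if directory not in grouped:
--             grouped[directory] = []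
--         grouped[directory].append(rec)
--     return grouped
-- ===== SOURCE B (Python) =====
-- def group_new_requests_by_directory(records):
--     default = 'Άγνωστη Διεύθυνση'
--     keys = list(dict.fromkeys(rec.get('directory', default) for rec in records))
--     return {k: [rec for rec in records if rec.get('directory', default) == k] for k in keys}
-- ===== Notes on version B (the rewrite author's own statement) =====
-- stated objective: alternative
-- what changed: Replaces the append-into-dict-on-first-sight loop by two passes: an ordered dedup of the directory keys followed by a dict comprehension that builds each group with a filter over the records.
import Mathlib
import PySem

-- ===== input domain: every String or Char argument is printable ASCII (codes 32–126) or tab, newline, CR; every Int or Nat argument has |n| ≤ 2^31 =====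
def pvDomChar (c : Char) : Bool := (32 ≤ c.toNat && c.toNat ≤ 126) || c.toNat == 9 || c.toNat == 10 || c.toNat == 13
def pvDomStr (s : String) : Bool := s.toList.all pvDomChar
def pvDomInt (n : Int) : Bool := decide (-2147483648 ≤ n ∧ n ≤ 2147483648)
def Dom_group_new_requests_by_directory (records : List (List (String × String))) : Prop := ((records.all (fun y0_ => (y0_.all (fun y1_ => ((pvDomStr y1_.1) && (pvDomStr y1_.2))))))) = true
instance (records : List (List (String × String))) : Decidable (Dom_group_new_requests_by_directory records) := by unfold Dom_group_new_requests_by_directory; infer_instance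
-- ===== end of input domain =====

-- B replaces A's append-into-dict-on-first-sight loop by an ordered dedup of the
-- directory keys followed by one filter per key (alternative decomposition, same result).


-- rec.get('directory', 'Άγνωστη Διεύθυνση')  (shared by both Pythons verbatim)
def pvKeyOf (rec : List (String × String)) : String :=
  (PySem.Dict.mk rec).getD "directory" "Άγνωστη Διεύθυνση"

-- ===== PORT A =====
-- the loop body of A: conditional fresh-empty insert, then grouped[directory].append(rec)
def pvStepA (grouped : PySem.Dict String (List (List (String × String))))
    (rec : List (String × String)) : PySem.Dict String (List (List (String × String))) :=
  let directory := pvKeyOf rec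
  let grouped := if grouped.contains directory then grouped else grouped.insert directory []
  grouped.insert directory (grouped.getD directory [] ++ [rec])

def group_new_requests_by_directory (records : List (List (String × String))) : List (String × List (List (String × String))) :=
  (records.foldl pvStepA PySem.Dict.empty).items

-- ===== PORT B =====
def group_new_requests_by_directory_alt (records : List (List (String × String))) : List (String × List (List (String × String))) :=
  let keys := PySem.List.dedup (records.map pvKeyOf)
  keys.map (fun k => (k, records.filter (fun rec => pvKeyOf rec == k)))

-- ===== PRECONDITION & SPEC =====
def Spec_group_new_requests_by_directory (records : List (List (String × String))) (out : List (String × List (List (String × String)))) : Prop := out = group_new_requests_by_directory_alt records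
instance (records : List (List (String × String))) (out : List (String × List (List (String × String)))) : Decidable (Spec_group_new_requests_by_directory records out) := by unfold Spec_group_new_requests_by_directory; infer_instance

-- ===== CLAIM (what is proved, stated in full; the proofs are below) =====
def Claim_equal_group_new_requests_by_directory : Prop := ∀ (records : List (List (String × String))), Dom_group_new_requests_by_directory records → Spec_group_new_requests_by_directory records (group_new_requests_by_directory records)

-- ===== LEMMAS AND PROOFS =====

-- the first components of B's result are exactly the deduped keys
lemma pv_fst_alt (l : List (List (String × String))) :
    (group_new_requests_by_directory_alt l).map Prod.fst = PySem.Set.ofList (l.map pvKeyOf) := by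
  have hid : (Prod.fst ∘ fun k => (k, l.filter (fun rec => pvKeyOf rec == k))) = id := rfl
  simp [group_new_requests_by_directory_alt, List.map_map, hid]

-- one step of A's loop, applied to B's value on the processed prefix, yields B's value on the extended prefix
lemma pv_step (pref : List (List (String × String))) (r : List (String × String)) :
    pvStepA (PySem.Dict.mk (group_new_requests_by_directory_alt pref)) r
      = PySem.Dict.mk (group_new_requests_by_directory_alt (pref ++ [r])) := by
  apply PySem.Dict.ext
  set k := pvKeyOf r with hk
  have hkeys : (PySem.Dict.mk (group_new_requests_by_directory_alt pref)).keys
      = PySem.Set.ofList (pref.map pvKeyOf) := by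
    simpa using pv_fst_alt pref
  have hnodup : (PySem.Dict.mk (group_new_requests_by_directory_alt pref)).keys.Nodup := by
    rw [hkeys]; exact PySem.Set.nodup_ofList _
  have hcontains : (PySem.Dict.mk (group_new_requests_by_directory_alt pref)).contains k
      = decide (k ∈ PySem.Set.ofList (pref.map pvKeyOf)) := by
    rw [PySem.Dict.contains_eq_decide_mem_keys, hkeys]
  have halt : group_new_requests_by_directory_alt (pref ++ [r])
      = (PySem.Set.add (PySem.Set.ofList (pref.map pvKeyOf)) k).map
          (fun k' => (k', pref.filter (fun rec => pvKeyOf rec == k')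
            ++ if pvKeyOf r == k' then [r] else [])) := by
    rw [hk]
    simp only [group_new_requests_by_directory_alt, PySem.List.dedup_eq_ofList,
      PySem.Set.ofList, List.map_append, List.map_cons, List.map_nil, List.foldl_append,
      List.foldl_cons, List.foldl_nil, List.filter_append]
    apply List.map_congr_left
    intro a _
    by_cases h : pvKeyOf r = a <;> simp [h]
  by_cases hmem : k ∈ PySem.Set.ofList (pref.map pvKeyOf)
  · -- key already present: conditional insert is skipped, entry for k gets r appended
    have hc : (PySem.Dict.mk (group_new_requests_by_directory_alt pref)).contains k = true := by
      rw [hcontains]; simpa using hmem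
    have hitem : (k, pref.filter (fun rec => pvKeyOf rec == k))
        ∈ (PySem.Dict.mk (group_new_requests_by_directory_alt pref)).items := by
      show _ ∈ group_new_requests_by_directory_alt pref
      simp only [group_new_requests_by_directory_alt, List.mem_map]
      exact ⟨k, by simpa using hmem, rfl⟩
    have hgetD : (PySem.Dict.mk (group_new_requests_by_directory_alt pref)).getD k []
        = pref.filter (fun rec => pvKeyOf rec == k) := by
      apply PySem.Dict.getD_of_mem_items <;> first | exact hitem | exact hnodup
    simp only [pvStepA, ← hk]
    rw [if_pos hc, hgetD, PySem.Dict.items_insert_of_contains _ _ hc, halt]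
    have hadd : PySem.Set.add (PySem.Set.ofList (pref.map pvKeyOf)) k
        = PySem.Set.ofList (pref.map pvKeyOf) := by
      simp only [PySem.Set.add]
      rw [if_pos]; simpa using hmem
    rw [hadd]
    show List.map _ (List.map _ (PySem.Set.ofList (pref.map pvKeyOf))) = _
    rw [List.map_map]
    apply List.map_congr_left
    intro k' _
    by_cases h : k' = k
    · subst h; simp [hk]
    · rw [← hk]
      simp [h, Ne.symm h]
  · -- fresh key: an empty group is inserted for k, then r appended to it
    have hc : (PySem.Dict.mk (group_new_requests_by_directory_alt pref)).contains k = false := by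
      rw [hcontains]; simpa using hmem
    have hnotpref : k ∉ pref.map pvKeyOf := by
      intro h; exact hmem ((PySem.Set.mem_ofList _ _).mpr h)
    have hc2 : ((PySem.Dict.mk (group_new_requests_by_directory_alt pref)).insert k
        ([] : List (List (String × String)))).contains k = true :=
      PySem.Dict.contains_insert_self _ _ _
    simp only [pvStepA, ← hk]
    rw [if_neg (by simp [hc]), PySem.Dict.getD_insert_self,
        PySem.Dict.items_insert_of_contains _ _ hc2,
        PySem.Dict.items_insert_of_not_contains _ _ hc, halt]
    have hadd : PySem.Set.add (PySem.Set.ofList (pref.map pvKeyOf)) k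
        = PySem.Set.ofList (pref.map pvKeyOf) ++ [k] := by
      simp only [PySem.Set.add]
      rw [if_neg]; intro h; exact hmem (by simpa using h)
    have hfil : pref.filter (fun rec => pvKeyOf rec == k) = [] := by
      rw [List.filter_eq_nil_iff]
      intro a ha hb
      exact hnotpref (List.mem_map.mpr ⟨a, ha, by simpa using hb⟩)
    rw [hadd, List.map_append, List.map_append]
    congr 1
    · -- entries for the old keys are untouched
      show List.map _ (group_new_requests_by_directory_alt pref) = _
      simp only [group_new_requests_by_directory_alt, PySem.List.dedup_eq_ofList, List.map_map]
      apply List.map_congr_left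
      intro k' hk'
      have hne : k' ≠ k := fun h => hmem (h ▸ hk')
      rw [← hk]
      simp [hne, Ne.symm hne]
    · -- the fresh entry becomes (k, [r]); the filter over pref at k is empty
      simp [hfil, ← hk]

lemma pv_loop (rest pref : List (List (String × String))) :
    (rest.foldl pvStepA (PySem.Dict.mk (group_new_requests_by_directory_alt pref))).items
      = group_new_requests_by_directory_alt (pref ++ rest) := by
  induction rest generalizing pref with
  | nil => simp
  | cons r rest ih =>
      rw [List.foldl_cons, pv_step, ih (pref ++ [r]), List.append_assoc]
      rfl

-- ===== VERDICT (by name: the statement is the Claim_ definition above) =====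
theorem group_new_requests_by_directory_spec : Claim_equal_group_new_requests_by_directory := by
  intro records _
  show group_new_requests_by_directory records = group_new_requests_by_directory_alt records
  have h := pv_loop records []
  simpa [group_new_requests_by_directory, group_new_requests_by_directory_alt,
    PySem.Dict.empty] using h
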